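-- pv_equiv track=rewrite | github.com/Milotrince/jpl-jwst-planets | extract_planets_old.py | group_maxes
-- ===== SOURCE A (Python) =====
-- def group_maxes(maxes):
-- 	groups = []
-- 	current_group = []
--
-- 	for (i, max_data) in enumerate(maxes):
-- 		if i+1 < len(maxes) and max_data['row']+1 == maxes[i+1]['row']:
-- 			current_group.append(max_data)
-- 		else:
-- 			current_group.append(max_data)
-- 			groups.append(current_group)
-- 			current_group = []
-- 	return groups
-- ===== SOURCE B (Python) =====
-- def _run(prev, rest):
--     """How many leading elements of rest continue the adjacent-row run after prev."""
--     if rest and prev['row'] + 1 == rest[0]['row']: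
--         return 1 + _run(rest[0], rest[1:])
--     return 0
--
--
-- def group_maxes(maxes):
--     if not maxes:
--         return []
--     k = 1 + _run(maxes[0], maxes[1:])
--     return [maxes[:k]] + group_maxes(maxes[k:])
-- ===== Notes on version B (the rewrite author's own statement) =====
-- stated objective: alternative
-- what changed: B is a recursive divide-off-the-first-run algorithm: a helper measures the length of the leading adjacent-row run, B slices it off as the first group and recurses on the remainder, instead of A's single accumulator loop with enumerate look-ahead and a current_group buffer.
import Mathlib
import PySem

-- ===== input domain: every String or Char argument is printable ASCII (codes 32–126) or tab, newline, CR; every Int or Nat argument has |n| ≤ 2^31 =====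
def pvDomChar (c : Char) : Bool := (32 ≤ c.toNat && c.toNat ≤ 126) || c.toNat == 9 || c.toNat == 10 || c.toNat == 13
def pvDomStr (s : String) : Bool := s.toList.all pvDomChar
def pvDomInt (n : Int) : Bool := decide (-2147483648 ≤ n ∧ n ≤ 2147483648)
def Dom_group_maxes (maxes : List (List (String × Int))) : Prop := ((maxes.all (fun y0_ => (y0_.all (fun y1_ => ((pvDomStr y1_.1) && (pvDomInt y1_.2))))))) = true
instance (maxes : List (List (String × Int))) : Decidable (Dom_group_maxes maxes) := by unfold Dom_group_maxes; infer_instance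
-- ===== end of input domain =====

-- B replaces A's accumulator loop with look-ahead by a recursive algorithm that measures the
-- leading adjacent-row run, slices it off as the first group and recurses (objective: alternative).

-- d['row'] : first match in the association list (none = KeyError, excluded by Pre_)
def pvRow (d : List (String × Int)) : Option Int := List.lookup "row" d

-- ===== PORT A =====
-- A's loop: index look-ahead 'i+1 < len(maxes) and maxes[i]['row']+1 == maxes[i+1]['row']' is
-- structurally 'rest nonempty and row x + 1 == row (head rest)'; state = (current_group, groups).
def group_maxes_goA (cur : List (List (String × Int))) (groups : List (List (List (String × Int))))
    : List (List (String × Int)) → List (List (List (String × Int)))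
  | [] => groups
  | x :: rest =>
    match rest with
    | y :: _ =>
      if (pvRow x).map (· + 1) = pvRow y then
        group_maxes_goA (cur ++ [x]) groups rest
      else
        group_maxes_goA [] (groups ++ [cur ++ [x]]) rest
    | [] => groups ++ [cur ++ [x]]

def group_maxes (maxes : List (List (String × Int))) : List (List (List (String × Int))) :=
  group_maxes_goA [] [] maxes

-- ===== PORT B =====
-- _run(prev, rest): 'rest and prev['row'] + 1 == rest[0]['row']' then 1 + _run(rest[0], rest[1:])
def group_maxes_run (prev : List (String × Int)) : List (List (String × Int)) → Nat
  | [] => 0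
  | y :: ys => if (pvRow prev).map (· + 1) = pvRow y then 1 + group_maxes_run y ys else 0

-- B: empty → []; else k = 1 + _run(maxes[0], maxes[1:]); [maxes[:k]] + group_maxes(maxes[k:]).
-- maxes[:k] / maxes[k:] with 0 ≤ k are exactly take k / drop k.
def group_maxes_alt : List (List (String × Int)) → List (List (List (String × Int)))
  | [] => []
  | x :: rest =>
    -- k = 1 + _run(maxes[0], maxes[1:])
    ((x :: rest).take (1 + group_maxes_run x rest))
      :: group_maxes_alt ((x :: rest).drop (1 + group_maxes_run x rest))
termination_by xs => xs.length
decreasing_by simp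

-- ===== PRECONDITION & SPEC =====
-- Pre_ excludes exactly the inputs where Python A raises KeyError: with ≥ 2 elements it reads
-- 'row' from every element (and B does the same).
def Pre_group_maxes (maxes : List (List (String × Int))) : Prop :=
  maxes.length ≤ 1 ∨ ∀ d ∈ maxes, (pvRow d).isSome
instance (maxes : List (List (String × Int))) : Decidable (Pre_group_maxes maxes) := by
  unfold Pre_group_maxes; infer_instance

def pvWitness_group_maxes : (List (List (String × Int))) :=
  [[("row", 1)], [("row", 2)], [("row", 5)], [("row", 6)], [("row", 7)]]

def Spec_group_maxes (maxes : List (List (String × Int))) (out : List (List (List (String × Int)))) : Prop := out = group_maxes_alt maxes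
instance (maxes : List (List (String × Int))) (out : List (List (List (String × Int)))) : Decidable (Spec_group_maxes maxes out) := by unfold Spec_group_maxes; infer_instance

-- ===== CLAIM (what is proved, stated in full; the proofs are below) =====
def Claim_equal_group_maxes : Prop := ∀ (maxes : List (List (String × Int))), Dom_group_maxes maxes → Pre_group_maxes maxes → Spec_group_maxes maxes (group_maxes maxes)

-- ===== LEMMAS AND PROOFS =====

-- Proof skeleton: A's recursion with a pending buffer cur produces groups ++ pvConsume cur xs,
-- and pvConsume splits off exactly the leading run B measures.
def pvConsume (cur : List (List (String × Int))) : List (List (String × Int)) → List (List (List (String × Int)))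
  | [] => []
  | x :: rest =>
    match rest with
    | y :: _ =>
      if (pvRow x).map (· + 1) = pvRow y then pvConsume (cur ++ [x]) rest
      else (cur ++ [x]) :: pvConsume [] rest
    | [] => [cur ++ [x]]

theorem goA_cons_cons (cur groups) (x y : List (String × Int)) (ys) :
    group_maxes_goA cur groups (x :: y :: ys)
      = if (pvRow x).map (· + 1) = pvRow y then group_maxes_goA (cur ++ [x]) groups (y :: ys)
        else group_maxes_goA [] (groups ++ [cur ++ [x]]) (y :: ys) := rfl

theorem consume_cons_cons (cur) (x y : List (String × Int)) (ys) :
    pvConsume cur (x :: y :: ys)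
      = if (pvRow x).map (· + 1) = pvRow y then pvConsume (cur ++ [x]) (y :: ys)
        else (cur ++ [x]) :: pvConsume [] (y :: ys) := rfl

theorem goA_eq_consume :
    ∀ (xs : List (List (String × Int))) cur groups,
      group_maxes_goA cur groups xs = groups ++ pvConsume cur xs := by
  intro xs
  induction xs with
  | nil => intro cur groups; simp [group_maxes_goA, pvConsume]
  | cons x rest ih =>
    intro cur groups
    cases rest with
    | nil => simp [group_maxes_goA, pvConsume]
    | cons y ys =>
      rw [goA_cons_cons, consume_cons_cons]
      by_cases h : (pvRow x).map (· + 1) = pvRow y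
      · rw [if_pos h, if_pos h, ih]
      · rw [if_neg h, if_neg h, ih]; simp

theorem consume_split :
    ∀ (rest : List (List (String × Int))) x cur,
      pvConsume cur (x :: rest)
        = (cur ++ (x :: rest).take (1 + group_maxes_run x rest))
          :: pvConsume [] ((x :: rest).drop (1 + group_maxes_run x rest)) := by
  intro rest
  induction rest with
  | nil => intro x cur; simp [pvConsume, group_maxes_run]
  | cons y ys ih =>
    intro x cur
    by_cases h : (pvRow x).map (· + 1) = pvRow y
    · have hr : group_maxes_run x (y :: ys) = group_maxes_run y ys + 1 := by
        simp [group_maxes_run, h, Nat.add_comm]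
      rw [consume_cons_cons, if_pos h, ih y (cur ++ [x]), hr,
        show 1 + (group_maxes_run y ys + 1) = (1 + group_maxes_run y ys) + 1 by omega,
        List.take_succ_cons, List.drop_succ_cons]
      simp
    · have hr : group_maxes_run x (y :: ys) = 0 := by simp [group_maxes_run, h]
      rw [consume_cons_cons, if_neg h, hr]
      simp

theorem consume_eq_alt :
    ∀ (xs : List (List (String × Int))), pvConsume [] xs = group_maxes_alt xs := by
  intro xs
  induction hn : xs.length using Nat.strong_induction_on generalizing xs with
  | _ n ih =>
    cases xs with
    | nil => rw [group_maxes_alt.eq_def]; simp [pvConsume]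
    | cons x rest =>
      rw [consume_split rest x [],
        ih (((x :: rest).drop (1 + group_maxes_run x rest)).length)
          (by subst hn; simp) _ rfl]
      conv_rhs => rw [group_maxes_alt.eq_def]
      simp

-- ===== VERDICT (by name: the statement is the Claim_ definition above) =====
theorem group_maxes_spec : Claim_equal_group_maxes := by
  intro maxes _hdom _hpre
  unfold Spec_group_maxes group_maxes
  rw [goA_eq_consume, consume_eq_alt]
  simp
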